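-- pv_equiv track=rewrite | github.com/glucawork/osm_map_matching | ta/osmgraph.py | ToOverpassQl
-- ===== SOURCE A (Python) =====
-- import string
--
-- def ToOverpassQl(s):
--     ns = ''
--
--     for x in s:
--         if x in string.punctuation + ' ' and x != '"' and x != '~':
--             ns += '%'+hex(ord(x))[2:]
--         else:
--             ns += x
--
--     ns += '&0A'
--     return ns
-- ===== SOURCE B (Python) =====
-- import string
--
-- # Characters to encode: punctuation + space, minus '"' and '~'.
-- # '%' is placed first so later passes may safely emit '%xx' escapes.
-- _SPECIALS = '%' + ''.join(c for c in string.punctuation + ' ' if c not in '"~%')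
--
-- def ToOverpassQl(s):
--     # Staged whole-string passes: one str.replace per special character,
--     # '%' handled first so escape sequences introduced later are never re-encoded.
--     for c in _SPECIALS:
--         s = s.replace(c, '%' + hex(ord(c))[2:])
--     return s + '&0A'
-- ===== Notes on version B (the rewrite author's own statement) =====
-- stated objective: faster
-- what changed: Replaces A's single per-character accumulation loop (membership test + running concatenation) by 32 staged whole-string str.replace passes, one per special character, ordered so the escape character's pass runs first and escapes emitted by later passes are never re-encoded.
import Mathlib
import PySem

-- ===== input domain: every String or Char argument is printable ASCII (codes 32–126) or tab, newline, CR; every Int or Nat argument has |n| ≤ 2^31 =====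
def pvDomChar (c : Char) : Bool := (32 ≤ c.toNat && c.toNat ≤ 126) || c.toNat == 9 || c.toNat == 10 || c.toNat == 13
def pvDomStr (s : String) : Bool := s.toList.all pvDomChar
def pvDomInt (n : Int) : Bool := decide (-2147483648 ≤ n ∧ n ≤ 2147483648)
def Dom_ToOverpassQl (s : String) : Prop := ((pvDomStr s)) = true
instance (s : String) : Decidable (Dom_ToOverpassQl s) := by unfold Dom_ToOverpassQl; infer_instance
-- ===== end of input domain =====

-- B replaces A's per-character accumulation loop with 32 staged whole-string
-- replace passes, one per special character ('%' first so later escapes are safe).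

-- hex digit characters, as Python's hex() produces (lowercase)
def pvHexDigit (n : Nat) : Char :=
  if n < 10 then Char.ofNat (48 + n) else Char.ofNat (87 + n)

-- hex(n)[2:] for a nonnegative n, as a list of chars (exact for Nat input)
def pvHexAux : Nat → Nat → List Char
  | 0, n => [pvHexDigit (n % 16)]
  | fuel + 1, n => if n < 16 then [pvHexDigit n] else pvHexAux fuel (n / 16) ++ [pvHexDigit (n % 16)]
def pvHexChars (n : Nat) : List Char := pvHexAux n n

-- string.punctuation + ' '
def pvPunctSpace : List Char := "!\"#$%&'()*+,-./:;<=>?@[\\]^_`{|}~ ".toList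

-- ===== PORT A =====
-- A: loop over the characters, appending either '%'+hex(ord(x)) or x to the accumulator ns, then append '&0A'.
def ToOverpassQl (s : String) : String :=
  String.ofList
    ((s.toList.foldl
      (fun ns x =>
        if pvPunctSpace.contains x && x != '"' && x != '~'
        then ns ++ '%' :: pvHexChars x.toNat
        else ns ++ [x])
      []) ++ "&0A".toList)

-- ===== PORT B =====
-- _SPECIALS = '%' + ''.join(c for c in string.punctuation + ' ' if c not in '"~%')
def pvSpecials : List Char :=
  '%' :: pvPunctSpace.filter (fun c => !(c == '"' || c == '~' || c == '%'))

-- the replacement string '%'+hex(ord(c))[2:] for a special character c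
def pvEnc (c : Char) : List Char := '%' :: pvHexChars c.toNat

-- s.replace(c, r) for a SINGLE-character needle c: exact as a flatMap over the chars
def pvReplace1 (c : Char) (r : List Char) (l : List Char) : List Char :=
  l.flatMap (fun x => if x == c then r else [x])

-- B: for c in _SPECIALS: s = s.replace(c, '%'+hex(ord(c))[2:]); return s + '&0A'
def ToOverpassQl_alt (s : String) : String :=
  String.ofList
    ((pvSpecials.foldl (fun l c => pvReplace1 c (pvEnc c) l) s.toList)
      ++ "&0A".toList)

-- ===== PRECONDITION & SPEC =====
def Spec_ToOverpassQl (s : String) (out : String) : Prop := out = ToOverpassQl_alt s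
instance (s : String) (out : String) : Decidable (Spec_ToOverpassQl s out) := by unfold Spec_ToOverpassQl; infer_instance

-- ===== CLAIM (what is proved, stated in full; the proofs are below) =====
def Claim_equal_ToOverpassQl : Prop := ∀ (s : String), Dom_ToOverpassQl s → Spec_ToOverpassQl s (ToOverpassQl s)

-- ===== LEMMAS AND PROOFS =====

-- composite per-character function described by a list of pending passes
def pvH (cs : List Char) (x : Char) : List Char :=
  if x ∈ cs then pvEnc x else [x]

theorem pv_flatMap_singleton (l : List Char) : l.flatMap (fun y => [y]) = l := by
  induction l with
  | nil => rfl
  | cons a t ih => simp [List.flatMap_cons, ih]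

-- the staged passes compute the composite per-character substitution, provided
-- no replacement output contains a character of a LATER pass
theorem pv_stages_eq (cs : List Char)
    (hp : cs.Pairwise (fun a b => b ∉ pvEnc a)) (l : List Char) :
    cs.foldl (fun l c => pvReplace1 c (pvEnc c) l) l = l.flatMap (pvH cs) := by
  induction cs generalizing l with
  | nil => exact (pv_flatMap_singleton l).symm
  | cons c cs ih =>
    rcases List.pairwise_cons.mp hp with ⟨hc, hp'⟩
    rw [List.foldl_cons, ih hp', pvReplace1, List.flatMap_assoc]
    apply List.flatMap_congr
    intro x _
    by_cases hx : x = c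
    · subst hx
      rw [if_pos (by simp)]
      have h1 : (pvEnc x).flatMap (pvH cs) = pvEnc x := by
        have hstep : ∀ y ∈ pvEnc x, pvH cs y = [y] := by
          intro y hy
          have hyn : y ∉ cs := fun hm => (hc y hm) hy
          simp [pvH, hyn]
        calc (pvEnc x).flatMap (pvH cs) = (pvEnc x).flatMap (fun y => [y]) :=
              List.flatMap_congr hstep
          _ = pvEnc x := pv_flatMap_singleton _
      rw [h1]
      simp [pvH]
    · rw [if_neg (by simp [hx])]
      simp only [List.flatMap_cons, List.flatMap_nil, List.append_nil]
      by_cases hm : x ∈ cs <;> simp [pvH, hm, hx]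

-- the pass alphabet matches A's branch condition, for EVERY character
theorem pv_mem_specials (x : Char) :
    pvSpecials.contains x = (pvPunctSpace.contains x && x != '"' && x != '~') := by
  by_cases hx : x = '%'
  · subst hx; decide
  · have hxb : (x == '%') = false := by simp [hx]
    simp only [pvSpecials, List.contains_cons, hxb, Bool.false_or]
    by_cases hp : x ∈ pvPunctSpace
    · have hpc : pvPunctSpace.contains x = true := List.contains_iff_mem.mpr hp
      by_cases h1 : x = '"'
      · subst h1; decide
      · by_cases h2 : x = '~'
        · subst h2; decide
        · have : x ∈ pvPunctSpace.filter (fun c => !(c == '"' || c == '~' || c == '%')) := by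
            simp [List.mem_filter, hp, h1, h2, hx]
          simp [hp, hx, h1, h2, bne]
    · have h1 : (pvPunctSpace.filter (fun c => !(c == '"' || c == '~' || c == '%'))).contains x = false := by
        rw [Bool.eq_false_iff]
        intro h
        exact hp (List.mem_of_mem_filter (List.contains_iff_mem.mp h))
      have h2 : pvPunctSpace.contains x = false := by
        rw [Bool.eq_false_iff]; intro h; exact hp (List.contains_iff_mem.mp h)
      simp [hp]

set_option maxHeartbeats 16000000 in
theorem pv_pairwise_specials :
    pvSpecials.Pairwise (fun a b => b ∉ pvEnc a) := by decide

-- the two traversals agree on the character list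
theorem pv_core (l : List Char) :
    l.foldl
      (fun ns x =>
        if pvPunctSpace.contains x && x != '"' && x != '~'
        then ns ++ '%' :: pvHexChars x.toNat
        else ns ++ [x]) []
    = pvSpecials.foldl (fun l c => pvReplace1 c (pvEnc c) l) l := by
  rw [pv_stages_eq pvSpecials pv_pairwise_specials]
  have hfun : (fun (ns : List Char) (x : Char) =>
      if pvPunctSpace.contains x && x != '"' && x != '~'
      then ns ++ '%' :: pvHexChars x.toNat else ns ++ [x])
    = (fun ns x => ns ++ (if pvPunctSpace.contains x && x != '"' && x != '~'
      then '%' :: pvHexChars x.toNat else [x])) := by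
    funext ns x; split <;> rfl
  rw [hfun, PySem.List.foldl_append_eq_flatMap]
  simp only [List.nil_append]
  apply List.flatMap_congr
  intro x _
  by_cases hx : x ∈ pvSpecials
  · have hc : (pvPunctSpace.contains x && x != '"' && x != '~') = true := by
      rw [← pv_mem_specials]; exact List.contains_iff_mem.mpr hx
    simp only [hc, if_pos]
    simp [pvH, hx, pvEnc]
  · have hc : (pvPunctSpace.contains x && x != '"' && x != '~') = false := by
      rw [← pv_mem_specials, Bool.eq_false_iff]
      intro h; exact hx (List.contains_iff_mem.mp h)
    simp only [hc, Bool.false_eq_true, if_neg, not_false_iff]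
    simp [pvH, hx]

theorem ToOverpassQl_spec : Claim_equal_ToOverpassQl := by
  intro s _
  unfold Spec_ToOverpassQl ToOverpassQl ToOverpassQl_alt
  rw [pv_core]
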